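-- pv_equiv track=rewrite | github.com/smy37/Daily_Coding | bfs_puzzle.py | rot_trans
-- ===== SOURCE A (Python) =====
-- import copy
--
-- def rot_trans(test1, test2, cri):
--     answer = 0
--     n1 = []
--     for i in test1:
--         temp = []
--         for j in i:
--             temp.append([j//cri, j%cri])
--         n1.append(temp)
--     n1 = sorted(n1)
--
--     for i in range(len(n1)):    ## i 조각 한개
--         n1[i] = sorted(n1[i])
--         c_x = n1[i][0][0]
--         c_y = n1[i][0][1]
--         for j in range(len(n1[i])):
--             n1[i][j][0] -= c_x
--             n1[i][j][1] -= c_y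
--
--     n2 = []
--     for i in test2:
--         temp = []
--         for j in i:
--             temp.append([j//cri, j%cri])
--         n2.append(temp)
--     n2 = sorted(n2)
--     dup_check = []
--
--
--     for i in range(len(n1)):
--         for j in range(len(n2)):    ## j는 조각 하나를 의미한다.
--             if j not in dup_check:
--                 if convert(copy.deepcopy(n2[j]), 0) == sorted(n1[i]):
--                     answer += len(n1[i])
--                     dup_check.append(j)
--
--                     break
--                 elif convert(copy.deepcopy(n2[j]), 1) == sorted(n1[i]):
--                     answer += len(n1[i])
--                     dup_check.append(j)
--
--                     break
--                 elif convert(copy.deepcopy(n2[j]), 2) == sorted(n1[i]):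
--
--                     answer += len(n1[i])
--                     dup_check.append(j)
--
--                     break
--                 elif convert(copy.deepcopy(n2[j]), 3) == sorted(n1[i]):
--
--                     answer += len(n1[i])
--                     dup_check.append(j)
--
--                     break
--
--     return answer
--
-- def convert(piece, ver):
--     for i in range(len(piece)):
--         if ver == 0:
--             a = -piece[i][1]
--             b = piece[i][0]
--             piece[i][0] = a
--             piece[i][1] = b
--         elif ver == 1:
--             a = -piece[i][0]
--             b = -piece[i][1]
--             piece[i][0] = a
--             piece[i][1] = b
--
--         elif ver == 2:
--             a = piece[i][1]
--             b = -piece[i][0]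
--             piece[i][0] = a
--             piece[i][1] = b
--         elif ver == 3:
--             continue
--
--     piece = sorted(piece)
--
--
--     c_x = piece[0][0]
--     c_y = piece[0][1]
--     for i in range(len(piece)):
--         piece[i][0] -= c_x
--         piece[i][1] -= c_y
--
--     return piece
-- ===== SOURCE B (Python) =====
-- def rot_trans(test1, test2, cri):
--     def canon(piece):
--         cells = [(j // cri, j % cri) for j in piece]
--         forms = []
--         for _ in range(4):
--             cells = [(-y, x) for x, y in cells]
--             s = sorted(cells)
--             x0, y0 = s[0]
--             forms.append(tuple((x - x0, y - y0) for x, y in s))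
--         return tuple(sorted(forms))
--
--     pool = {}
--     for p in test2:
--         k = canon(p)
--         pool[k] = pool.get(k, 0) + 1
--     answer = 0
--     for p in test1:
--         k = canon(p)
--         if pool.get(k, 0) > 0:
--             pool[k] -= 1
--             answer += len(p)
--     return answer
-- ===== Notes on version B (the rewrite author's own statement) =====
-- stated objective: faster
-- what changed: Instead of A's greedy nested scan that re-normalizes and compares every unmatched test2 piece under 4 rotations for each test1 piece, B computes a rotation-canonical key (sorted tuple of the 4 normalized rotations) once per piece, counts test2 keys in a dict, and matches test1 pieces against the counts in one pass.
-- outside the precondition, e.g. on rot_trans([], [[]], 2): A returns 0, B raises IndexError; on rot_trans([], [], 0): A returns 0, B returns 0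
import Mathlib
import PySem

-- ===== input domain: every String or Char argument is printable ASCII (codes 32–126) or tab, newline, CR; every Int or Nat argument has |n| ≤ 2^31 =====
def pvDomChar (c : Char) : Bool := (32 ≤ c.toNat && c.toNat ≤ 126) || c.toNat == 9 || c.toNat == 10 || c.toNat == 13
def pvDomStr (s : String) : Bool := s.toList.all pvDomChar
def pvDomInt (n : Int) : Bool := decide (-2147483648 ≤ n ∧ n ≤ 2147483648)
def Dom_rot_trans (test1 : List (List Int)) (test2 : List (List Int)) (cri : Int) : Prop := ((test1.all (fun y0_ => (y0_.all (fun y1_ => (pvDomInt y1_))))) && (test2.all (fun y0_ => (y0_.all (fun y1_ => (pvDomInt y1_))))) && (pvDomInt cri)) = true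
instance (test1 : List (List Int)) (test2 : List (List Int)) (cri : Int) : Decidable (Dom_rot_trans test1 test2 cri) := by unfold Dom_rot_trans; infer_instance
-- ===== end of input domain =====

-- B replaces A's quadratic greedy scan (each piece of test1 scanned against all unmatched pieces of
-- test2 under 4 rotations) by hashing every piece once to a rotation-canonical key and matching
-- multiset counts in one pass; equivalence of return values is proved on Pre_ below.


-- ===== PORT A =====
-- [j//cri, j%cri]
def pvCell (cri j : Int) : List Int := [PySem.Int.floordiv j cri, PySem.Int.mod j cri]

-- the 'c_x = piece[0][0]; c_y = piece[0][1]; for i: piece[i][0] -= c_x; piece[i][1] -= c_y' block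
-- (applied to an already sorted piece); on [] Python raises IndexError (excluded by Pre_)
def pvTranslate (s : List (List Int)) : List (List Int) :=
  match s with
  | [] => []
  | c :: t => (c :: t).map (fun q => [q.getD 0 0 - c.getD 0 0, q.getD 1 0 - c.getD 1 0])

-- the per-cell body of convert's 'for i in range(len(piece))' loop
def pvRotCell (ver : Int) (c : List Int) : List Int :=
  if ver = 0 then [-(c.getD 1 0), c.getD 0 0]
  else if ver = 1 then [-(c.getD 0 0), -(c.getD 1 0)]
  else if ver = 2 then [c.getD 1 0, -(c.getD 0 0)]
  else c

-- convert(piece, ver)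
def pvConvert (piece : List (List Int)) (ver : Int) : List (List Int) :=
  pvTranslate (PySem.List.sorted (piece.map (pvRotCell ver)) (fun x => x))

-- the inner 'for j in range(len(n2))' loop: first j not in dup_check matching one of the 4 rotations
def pvFindJ (x : List (List Int)) (l : List (List (List Int))) (dup : List Int) (j : Int) : Option Int :=
  match l with
  | [] => none
  | Y :: t =>
    if j ∉ dup ∧ (pvConvert Y 0 = x ∨ pvConvert Y 1 = x ∨ pvConvert Y 2 = x ∨ pvConvert Y 3 = x)
    then some j
    else pvFindJ x t dup (j + 1)

def rot_trans (test1 : List (List Int)) (test2 : List (List Int)) (cri : Int) : Int :=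
  let n1 := PySem.List.sorted (test1.map (fun p => p.map (pvCell cri))) (fun x => x)
  let n1 := n1.map (fun p => pvTranslate (PySem.List.sorted p (fun c => c)))
  let n2 := PySem.List.sorted (test2.map (fun p => p.map (pvCell cri))) (fun x => x)
  (n1.foldl (fun st x =>
      match pvFindJ (PySem.List.sorted x (fun c => c)) n2 st.2 0 with
      | some j => (st.1 + PySem.List.len x, st.2 ++ [j])
      | none => st) ((0 : Int), ([] : List Int))).1

-- ===== PORT B =====
-- '(-y, x)' rotation of Source B
def pvRotB (c : List Int) : List Int := [-(c.getD 1 0), c.getD 0 0]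

-- 'normalize': sort the cells, translate so the least cell is (0,0); on [] Source B raises (excluded by Pre_)
def pvNormB (cells : List (List Int)) : List (List Int) :=
  match PySem.List.sorted cells (fun c => c) with
  | [] => []
  | c :: t => (c :: t).map (fun q => [q.getD 0 0 - c.getD 0 0, q.getD 1 0 - c.getD 1 0])

-- canon(piece): sorted tuple of the 4 normalized rotations
def pvCanon (cri : Int) (p : List Int) : List (List (List Int)) :=
  let cells0 := p.map (fun j => [PySem.Int.floordiv j cri, PySem.Int.mod j cri])
  let st := (List.range 4).foldl
      (fun (st : List (List Int) × List (List (List Int))) _ =>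
        let c := st.1.map pvRotB
        (c, st.2 ++ [pvNormB c])) (cells0, [])
  PySem.List.sorted st.2 (fun f => f)

def rot_trans_alt (test1 : List (List Int)) (test2 : List (List Int)) (cri : Int) : Int :=
  let pool := test2.foldl
    (fun d p => let k := pvCanon cri p; d.insert k (d.getD k 0 + 1)) PySem.Dict.empty
  (test1.foldl (fun (st : Int × PySem.Dict (List (List (List Int))) Int) p =>
      let k := pvCanon cri p
      if 0 < st.2.getD k 0 then (st.1 + PySem.List.len p, st.2.insert k (st.2.getD k 0 - 1)) else st)
    (0, pool)).1

-- ===== PRECONDITION & SPEC =====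
-- Pre_ excludes cri = 0 (ZeroDivisionError) and inputs containing an empty piece, on which both
-- programs raise IndexError except in degenerate corners (e.g. empty test1) that A never reaches.
def Pre_rot_trans (test1 : List (List Int)) (test2 : List (List Int)) (cri : Int) : Prop :=
  cri ≠ 0 ∧ (∀ p ∈ test1, p ≠ []) ∧ (∀ p ∈ test2, p ≠ [])
instance (test1 : List (List Int)) (test2 : List (List Int)) (cri : Int) : Decidable (Pre_rot_trans test1 test2 cri) := by unfold Pre_rot_trans; infer_instance

def pvWitness_rot_trans : List (List Int) × List (List Int) × Int := ([[0, 1, 4]], [[2, 3, 7]], 4)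

def Spec_rot_trans (test1 : List (List Int)) (test2 : List (List Int)) (cri : Int) (out : Int) : Prop := out = rot_trans_alt test1 test2 cri
instance (test1 : List (List Int)) (test2 : List (List Int)) (cri : Int) (out : Int) : Decidable (Spec_rot_trans test1 test2 cri out) := by unfold Spec_rot_trans; infer_instance

-- ===== CLAIM (what is proved, stated in full; the proofs are below) =====
def Claim_equal_rot_trans : Prop := ∀ (test1 : List (List Int)) (test2 : List (List Int)) (cri : Int), Dom_rot_trans test1 test2 cri → Pre_rot_trans test1 test2 cri → Spec_rot_trans test1 test2 cri (rot_trans test1 test2 cri)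

-- ===== LEMMAS AND PROOFS =====

def IsCell (c : List Int) : Prop := ∃ a b : Int, c = [a, b]
def Cells (Y : List (List Int)) : Prop := ∀ c ∈ Y, IsCell c

-- proof-side translation of a cell
def pvShift (u v : Int) (q : List Int) : List Int := [q.getD 0 0 + u, q.getD 1 0 + v]

-- the 4 normalized rotations of a cell list, in Source B's order
def formsC (Y : List (List Int)) : List (List (List Int)) :=
  [pvNormB (Y.map pvRotB), pvNormB ((Y.map pvRotB).map pvRotB),
   pvNormB (((Y.map pvRotB).map pvRotB).map pvRotB),
   pvNormB ((((Y.map pvRotB).map pvRotB).map pvRotB).map pvRotB)]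

def canonC (Y : List (List Int)) : List (List (List Int)) :=
  PySem.List.sorted (formsC Y) (fun f => f)

-- weight of a canonical key: the cell count of any of its forms
def wK (k : List (List (List Int))) : Int := PySem.List.len (k.headD [])

-- abstract greedy-consume runner both loops reduce to
def runSpec (keys : List (List (List (List Int)))) (f : List (List (List Int)) → Nat) : Int :=
  match keys with
  | [] => 0
  | k :: t => if 0 < f k then wK k + runSpec t (Function.update f k (f k - 1)) else runSpec t f

-- count of not-yet-matched pieces of l with canonical form k, indices starting at j0
def cntU (j0 : Int) (l : List (List (List Int))) (dup : List Int) (k : List (List (List Int))) : Nat :=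
  match l with
  | [] => 0
  | Y :: t => (if j0 ∉ dup ∧ canonC Y = k then 1 else 0) + cntU (j0 + 1) t dup k

theorem instLT_eq {κ : Type} [LinearOrder κ] (inst : DecidableLT κ) :
    inst = LinearOrder.toDecidableLT := by
  funext a b; exact Subsingleton.elim _ _

theorem cell_lt (a b c d : Int) : ([a, b] : List Int) < [c, d] ↔ a < c ∨ (a = c ∧ b < d) := by
  simp [List.cons_lt_cons_iff]

theorem cell_le (a b c d : Int) : ([a, b] : List Int) ≤ [c, d] ↔ a < c ∨ (a = c ∧ b ≤ d) := by
  rw [← not_lt, cell_lt]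
  constructor <;> intro h <;> rcases lt_trichotomy a c with h1|h1|h1 <;> simp_all <;> omega

theorem shift_mono (u v : Int) {a b : List Int} (ha : IsCell a) (hb : IsCell b) (h : a ≤ b) :
    pvShift u v a ≤ pvShift u v b := by
  obtain ⟨a1, a2, rfl⟩ := ha; obtain ⟨b1, b2, rfl⟩ := hb
  simp only [pvShift, List.getD_cons_zero, List.getD_cons_succ]
  rw [cell_le] at h ⊢
  omega

theorem psort_pairwise (l : List (List Int)) :
    (PySem.List.sorted l (fun c => c)).Pairwise (· ≤ ·) := by
  have key := PySem.List.sorted_pairwise (κ := List Int) l (fun c => c)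
  rw [← instLT_eq (fun (a b : List Int) => a.decidableLT b)] at key
  exact key

theorem psort_self (l : List (List Int)) (h : l.Pairwise (· ≤ ·)) :
    PySem.List.sorted l (fun c => c) = l := by
  have key := PySem.List.sorted_eq_self_of_pairwise (κ := List Int) l (fun c => c) h
  rw [← instLT_eq (fun (a b : List Int) => a.decidableLT b)] at key
  exact key

theorem sorted_perm_eq {l l' : List (List Int)} (h : l.Perm l') :
    PySem.List.sorted l (fun c => c) = PySem.List.sorted l' (fun c => c) := by
  have key := PySem.List.sorted_eq_sorted_of_perm (κ := List Int) l l' (fun c => c) (fun _ _ e => e) h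
  rw [← instLT_eq (fun (a b : List Int) => a.decidableLT b)] at key
  exact key

theorem sorted_perm_eqP {l l' : List (List (List Int))} (h : l.Perm l') :
    PySem.List.sorted l (fun c => c) = PySem.List.sorted l' (fun c => c) := by
  have key := PySem.List.sorted_eq_sorted_of_perm (κ := List (List Int)) l l' (fun c => c) (fun _ _ e => e) h
  rw [← instLT_eq (fun (a b : List (List Int)) => a.decidableLT b)] at key
  exact key

theorem sorted_map_mono (f : List Int → List Int) (l : List (List Int))
    (h : ∀ a ∈ l, ∀ b ∈ l, a ≤ b → f a ≤ f b) :
    PySem.List.sorted (l.map f) (fun c => c) = (PySem.List.sorted l (fun c => c)).map f := by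
  have hperm : ((PySem.List.sorted l (fun c => c)).map f).Perm (l.map f) :=
    (PySem.List.sorted_perm l _ false).map f
  have hpw : ((PySem.List.sorted l (fun c => c)).map f).Pairwise (· ≤ ·) := by
    rw [List.pairwise_map]
    refine List.Pairwise.imp_of_mem ?_ (psort_pairwise l)
    intro a b hma hmb hab
    exact h a ((PySem.List.mem_sorted l _ false a).1 hma) b ((PySem.List.mem_sorted l _ false b).1 hmb) hab
  have key := PySem.List.sorted_id_eq_of_perm_of_pairwise (κ := List Int) (l.map f) _ hperm hpw
  rw [← instLT_eq (fun (a b : List Int) => a.decidableLT b)] at key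
  exact key

theorem normB_nil_of {l : List (List Int)} (h : PySem.List.sorted l (fun c => c) = []) :
    pvNormB l = [] := by unfold pvNormB; rw [h]

theorem normB_cons_of {l : List (List Int)} {c : List Int} {t : List (List Int)}
    (h : PySem.List.sorted l (fun c => c) = c :: t) :
    pvNormB l = (c :: t).map (fun q => [q.getD 0 0 - c.getD 0 0, q.getD 1 0 - c.getD 1 0]) := by
  unfold pvNormB; rw [h]

theorem body_eq_shift (c : List Int) :
    (fun q => [q.getD 0 0 - c.getD 0 0, q.getD 1 0 - c.getD 1 0]) =
      pvShift (-(c.getD 0 0)) (-(c.getD 1 0)) := by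
  funext q; simp [pvShift, sub_eq_add_neg]

theorem normB_perm {l l' : List (List Int)} (h : l.Perm l') : pvNormB l = pvNormB l' := by
  simp only [pvNormB, sorted_perm_eq h]

theorem normB_cells (l : List (List Int)) : Cells (pvNormB l) := by
  unfold pvNormB
  cases PySem.List.sorted l (fun c => c) with
  | nil => intro c hc; simp at hc
  | cons c t =>
    intro q hq
    simp only [List.mem_map] at hq
    obtain ⟨r, _, rfl⟩ := hq
    exact ⟨_, _, rfl⟩

theorem cells_sorted {l : List (List Int)} (hl : Cells l) :
    Cells (PySem.List.sorted l (fun c => c)) := by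
  intro c hc; exact hl c ((PySem.List.mem_sorted l _ false c).1 hc)

theorem normB_shift (u v : Int) (l : List (List Int)) (hl : Cells l) :
    pvNormB (l.map (pvShift u v)) = pvNormB l := by
  have hs : PySem.List.sorted (l.map (pvShift u v)) (fun c => c) =
      (PySem.List.sorted l (fun c => c)).map (pvShift u v) := by
    apply sorted_map_mono
    intro a ha b hb hab
    exact shift_mono u v (hl a ha) (hl b hb) hab
  cases h : PySem.List.sorted l (fun c => c) with
  | nil =>
    rw [h, List.map_nil] at hs
    rw [normB_nil_of hs, normB_nil_of h]
  | cons c t =>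
    rw [h, List.map_cons] at hs
    rw [normB_cons_of hs, normB_cons_of h, ← List.map_cons (f := pvShift u v), List.map_map]
    apply List.map_congr_left
    intro q _
    simp only [Function.comp, pvShift, List.getD_cons_zero, List.getD_cons_succ, List.cons.injEq]
    refine ⟨by ring, by ring, trivial⟩

theorem normB_pairwise (l : List (List Int)) (hl : Cells l) :
    (pvNormB l).Pairwise (· ≤ ·) := by
  cases h : PySem.List.sorted l (fun c => c) with
  | nil => rw [normB_nil_of h]; simp
  | cons c t =>
    have hp := psort_pairwise l
    have hc := cells_sorted hl
    rw [h] at hp hc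
    rw [normB_cons_of h, body_eq_shift c]
    rw [List.pairwise_map]
    exact hp.imp_of_mem (fun {a b} ha hb hab => shift_mono _ _ (hc _ ha) (hc _ hb) hab)

theorem normB_idem (l : List (List Int)) (hl : Cells l) : pvNormB (pvNormB l) = pvNormB l := by
  have hsort : PySem.List.sorted (pvNormB l) (fun c => c) = pvNormB l :=
    psort_self _ (normB_pairwise l hl)
  have hcells := normB_cells l
  cases h : pvNormB l with
  | nil => rfl
  | cons d s =>
    rw [h] at hsort hcells
    have hd : d.getD 0 0 = 0 ∧ d.getD 1 0 = 0 := by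
      cases h2 : PySem.List.sorted l (fun c => c) with
      | nil => rw [normB_nil_of h2] at h; cases h
      | cons c t =>
        rw [normB_cons_of h2] at h
        simp only [List.map_cons, List.cons.injEq] at h
        obtain ⟨hd, _⟩ := h
        rw [← hd]
        simp only [List.getD_cons_zero, List.getD_cons_succ]
        omega
    rw [normB_cons_of hsort]
    have key : List.map (fun q => [q.getD 0 0 - d.getD 0 0, q.getD 1 0 - d.getD 1 0]) (d :: s) =
        List.map id (d :: s) := by
      apply List.map_congr_left
      intro q hq
      obtain ⟨a, b, rfl⟩ := hcells q hq
      simp only [List.getD_cons_zero, List.getD_cons_succ, id]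
      rw [hd.1, hd.2]
      simp
    rw [key, List.map_id]

theorem cells_map_rotB (Y : List (List Int)) : Cells (Y.map pvRotB) := by
  intro c hc
  simp only [List.mem_map] at hc
  obtain ⟨r, _, rfl⟩ := hc
  exact ⟨_, _, rfl⟩

theorem map_rot4 (Y : List (List Int)) (hY : Cells Y) :
    (((Y.map pvRotB).map pvRotB).map pvRotB).map pvRotB = Y := by
  simp only [List.map_map]
  have : ∀ q ∈ Y, (pvRotB ∘ pvRotB ∘ pvRotB ∘ pvRotB) q = id q := by
    intro q hq
    obtain ⟨a, b, rfl⟩ := hY q hq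
    simp [pvRotB, Function.comp]
  rw [List.map_congr_left this, List.map_id]

-- generic: after normalization, a pointwise-linear map is absorbed by another normalization
theorem normB_map_g_normB (g : List Int → List Int) (gu gv : Int → Int → Int)
    (hg : ∀ u v q, g (pvShift u v q) = pvShift (gu u v) (gv u v) (g q))
    (hc : ∀ q, IsCell (g q)) (l : List (List Int)) (hl : Cells l) :
    pvNormB ((pvNormB l).map g) = pvNormB (l.map g) := by
  cases h : PySem.List.sorted l (fun c => c) with
  | nil =>
    have hl0 : l = [] := (PySem.List.sorted_eq_nil_iff l _ false).1 h
    subst hl0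
    rw [normB_nil_of h]
  | cons c t =>
    rw [normB_cons_of h, body_eq_shift c, List.map_map]
    have comp_eq : (g ∘ pvShift (-(c.getD 0 0)) (-(c.getD 1 0))) =
        (pvShift (gu (-(c.getD 0 0)) (-(c.getD 1 0))) (gv (-(c.getD 0 0)) (-(c.getD 1 0)))) ∘ g := by
      funext q; exact hg _ _ q
    rw [comp_eq, ← List.map_map]
    rw [normB_shift _ _ _ (by intro q hq; simp only [List.mem_map] at hq; obtain ⟨r, _, rfl⟩ := hq; exact hc r)]
    apply normB_perm
    have hp : (c :: t).Perm l := h ▸ PySem.List.sorted_perm l (fun c => c) false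
    exact hp.map g

theorem canon_rot (Y : List (List Int)) : canonC (Y.map pvRotB) = canonC Y := by
  unfold canonC
  apply sorted_perm_eqP
  have h4 : formsC (Y.map pvRotB) =
      [pvNormB ((Y.map pvRotB).map pvRotB), pvNormB (((Y.map pvRotB).map pvRotB).map pvRotB),
       pvNormB ((((Y.map pvRotB).map pvRotB).map pvRotB).map pvRotB), pvNormB (Y.map pvRotB)] := by
    unfold formsC
    rw [map_rot4 (Y.map pvRotB) (cells_map_rotB Y)]
  rw [h4]
  unfold formsC
  exact List.perm_append_singleton (pvNormB (Y.map pvRotB))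
    [pvNormB ((Y.map pvRotB).map pvRotB), pvNormB (((Y.map pvRotB).map pvRotB).map pvRotB),
     pvNormB ((((Y.map pvRotB).map pvRotB).map pvRotB).map pvRotB)]

theorem rot_shift (u v : Int) (q : List Int) :
    pvRotB (pvShift u v q) = pvShift (-v) u (pvRotB q) := by
  simp only [pvRotB, pvShift, List.getD_cons_zero, List.getD_cons_succ, List.cons.injEq, and_true]
  omega

theorem canon_norm (Y : List (List Int)) (hY : Cells Y) : canonC (pvNormB Y) = canonC Y := by
  unfold canonC formsC
  simp only [List.map_map]
  have hc1 : ∀ q, IsCell (pvRotB q) := fun q => ⟨_, _, rfl⟩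
  have hcc : ∀ (f : List Int → List Int), (∀ q, IsCell ((pvRotB ∘ f) q)) := fun f q => ⟨_, _, rfl⟩
  have hg1 : ∀ u v q, pvRotB (pvShift u v q) = pvShift (-v) u (pvRotB q) := rot_shift
  have hg2 : ∀ u v q, (pvRotB ∘ pvRotB) (pvShift u v q) = pvShift (-u) (-v) ((pvRotB ∘ pvRotB) q) := by
    intro u v q; simp only [Function.comp, rot_shift]
  have hg3 : ∀ u v q, (pvRotB ∘ pvRotB ∘ pvRotB) (pvShift u v q) =
      pvShift v (-u) ((pvRotB ∘ pvRotB ∘ pvRotB) q) := by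
    intro u v q; simp only [Function.comp, rot_shift, neg_neg]
  have hg4 : ∀ u v q, (pvRotB ∘ pvRotB ∘ pvRotB ∘ pvRotB) (pvShift u v q) =
      pvShift u v ((pvRotB ∘ pvRotB ∘ pvRotB ∘ pvRotB) q) := by
    intro u v q; simp only [Function.comp, rot_shift, neg_neg]
  rw [normB_map_g_normB pvRotB _ _ hg1 hc1 Y hY,
      normB_map_g_normB (pvRotB ∘ pvRotB) _ _ hg2 (hcc _) Y hY,
      normB_map_g_normB (pvRotB ∘ pvRotB ∘ pvRotB) _ _ hg3 (hcc _) Y hY,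
      normB_map_g_normB (pvRotB ∘ pvRotB ∘ pvRotB ∘ pvRotB) _ _ hg4 (hcc _) Y hY]

theorem normB_eq_translate (l : List (List Int)) :
    pvNormB l = pvTranslate (PySem.List.sorted l (fun c => c)) := rfl

theorem conv0 (Y : List (List Int)) : pvConvert Y 0 = pvNormB (Y.map pvRotB) := by
  have h : pvRotCell 0 = pvRotB := by
    funext c; simp [pvRotCell, pvRotB]
  rw [normB_eq_translate]
  unfold pvConvert
  rw [h]

theorem conv1 (Y : List (List Int)) : pvConvert Y 1 = pvNormB ((Y.map pvRotB).map pvRotB) := by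
  have h : pvRotCell 1 = pvRotB ∘ pvRotB := by
    funext c; simp [pvRotCell, pvRotB, Function.comp]
  rw [normB_eq_translate]
  unfold pvConvert
  rw [h, List.map_map]

theorem conv2 (Y : List (List Int)) :
    pvConvert Y 2 = pvNormB (((Y.map pvRotB).map pvRotB).map pvRotB) := by
  have h : pvRotCell 2 = pvRotB ∘ pvRotB ∘ pvRotB := by
    funext c; simp [pvRotCell, pvRotB, Function.comp]
  rw [normB_eq_translate]
  unfold pvConvert
  rw [h, List.map_map, List.map_map, Function.comp_assoc]

theorem conv3 (Y : List (List Int)) : pvConvert Y 3 = pvNormB Y := by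
  have h : pvRotCell 3 = id := by
    funext c; simp [pvRotCell]
  rw [normB_eq_translate]
  unfold pvConvert
  rw [h, List.map_id]

theorem key_iff (x Y : List (List Int)) (hY : Cells Y) (hx : Cells x) (hxn : pvNormB x = x) :
    (pvConvert Y 0 = x ∨ pvConvert Y 1 = x ∨ pvConvert Y 2 = x ∨ pvConvert Y 3 = x) ↔
      canonC x = canonC Y := by
  have hmem : (pvConvert Y 0 = x ∨ pvConvert Y 1 = x ∨ pvConvert Y 2 = x ∨ pvConvert Y 3 = x) ↔
      x ∈ formsC Y := by
    rw [conv0, conv1, conv2, conv3]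
    simp only [formsC, List.mem_cons, List.not_mem_nil, or_false]
    rw [map_rot4 Y hY]
    constructor
    · rintro (h | h | h | h)
      · exact Or.inl h.symm
      · exact Or.inr (Or.inl h.symm)
      · exact Or.inr (Or.inr (Or.inl h.symm))
      · exact Or.inr (Or.inr (Or.inr h.symm))
    · rintro (h | h | h | h)
      · exact Or.inl h.symm
      · exact Or.inr (Or.inl h.symm)
      · exact Or.inr (Or.inr (Or.inl h.symm))
      · exact Or.inr (Or.inr (Or.inr h.symm))
  rw [hmem]
  constructor
  · intro hm
    simp only [formsC, List.mem_cons, List.not_mem_nil, or_false] at hm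
    have c1 := canon_rot Y
    have c2 := canon_rot (Y.map pvRotB)
    have c3 := canon_rot ((Y.map pvRotB).map pvRotB)
    have c4 := canon_rot (((Y.map pvRotB).map pvRotB).map pvRotB)
    rcases hm with h | h | h | h <;> rw [h]
    · rw [canon_norm _ (cells_map_rotB Y), c1]
    · rw [canon_norm _ (cells_map_rotB _), c2, c1]
    · rw [canon_norm _ (cells_map_rotB _), c3, c2, c1]
    · rw [canon_norm _ (cells_map_rotB _), c4, c3, c2, c1]
  · intro hc
    have hx4 : x ∈ formsC x := by
      have h4 : pvNormB ((((x.map pvRotB).map pvRotB).map pvRotB).map pvRotB) = x := by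
        rw [map_rot4 x hx, hxn]
      simp only [formsC, List.mem_cons, List.not_mem_nil, or_false]
      exact Or.inr (Or.inr (Or.inr h4.symm))
    have hx5 : x ∈ canonC x := by
      rw [canonC, PySem.List.mem_sorted]
      exact hx4
    rw [hc, canonC, PySem.List.mem_sorted] at hx5
    exact hx5

theorem normB_length (l : List (List Int)) : (pvNormB l).length = l.length := by
  unfold pvNormB
  cases h : PySem.List.sorted l (fun c => c) with
  | nil => simp [← PySem.List.length_sorted l (fun (c : List Int) => c) false, h]
  | cons c t => simp [← PySem.List.length_sorted l (fun (c : List Int) => c) false, h]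

theorem wK_canon (Y : List (List Int)) : wK (canonC Y) = (Y.length : Int) := by
  have hne : canonC Y ≠ [] := by
    rw [canonC, Ne, PySem.List.sorted_eq_nil_iff]
    simp [formsC]
  have hmem : (canonC Y).headD [] ∈ formsC Y := by
    rw [← PySem.List.mem_sorted (formsC Y) (fun f => f) false, ← canonC]
    cases h : canonC Y with
    | nil => exact absurd h hne
    | cons a s => simp
  have hlen : ∀ f ∈ formsC Y, f.length = Y.length := by
    intro f hf
    simp only [formsC, List.mem_cons, List.not_mem_nil, or_false] at hf
    rcases hf with h | h | h | h <;> subst h <;> simp [normB_length]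
  rw [wK, PySem.List.len_eq, hlen _ hmem]

theorem canon_eq (cri : Int) (p : List Int) : pvCanon cri p = canonC (p.map (pvCell cri)) := rfl

theorem wK_pvCanon (cri : Int) (p : List Int) : wK (pvCanon cri p) = (p.length : Int) := by
  rw [canon_eq, wK_canon, List.length_map]

theorem runSpec_perm {l l' : List (List (List (List Int)))} (h : l.Perm l') :
    ∀ f, runSpec l f = runSpec l' f := by
  induction h with
  | nil => intro f; rfl
  | cons k h ih => intro f; simp only [runSpec, ih]
  | swap a b l =>
    intro f
    by_cases hab : a = b
    · subst hab; rfl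
    · have hba : b ≠ a := Ne.symm hab
      have e1 : Function.update f b (f b - 1) a = f a := Function.update_of_ne hab _ f
      have e2 : Function.update f a (f a - 1) b = f b := Function.update_of_ne hba _ f
      by_cases h1 : 0 < f a <;> by_cases h2 : 0 < f b
      · simp only [runSpec, e1, e2, if_pos h1, if_pos h2]
        rw [Function.update_comm hab]
        ring
      · simp only [runSpec, e1, e2, if_pos h1, if_neg h2]
      · simp only [runSpec, e1, e2, if_neg h1, if_pos h2]
      · simp only [runSpec, e1, e2, if_neg h1, if_neg h2]
  | trans h1 h2 ih1 ih2 => intro f; exact (ih1 f).trans (ih2 f)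

theorem cnt_nil_dup (l : List (List (List Int))) (k : List (List (List Int))) :
    ∀ j0, cntU j0 l [] k = (l.map canonC).count k := by
  induction l with
  | nil => intro j0; rfl
  | cons Y t ih =>
    intro j0
    simp only [cntU, List.map_cons, List.count_cons, ih (j0 + 1), List.not_mem_nil,
      not_false_iff, true_and]
    by_cases h : canonC Y = k
    · simp [h, Nat.add_comm]
    · simp only [if_neg (fun hh : canonC Y = k => absurd hh h)]
      have hbe : ¬(canonC Y == k) = true := by simpa using h
      simp [hbe]

theorem cnt_append_lt (l : List (List (List Int))) (k : List (List (List Int))) :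
    ∀ j0 dup (a : Int), a < j0 → cntU j0 l (dup ++ [a]) k = cntU j0 l dup k := by
  induction l with
  | nil => intros; rfl
  | cons Y t ih =>
    intro j0 dup a ha
    simp only [cntU, List.mem_append, List.mem_singleton]
    have hiff : (¬(j0 ∈ dup ∨ j0 = a)) ↔ j0 ∉ dup := by
      constructor
      · intro h hm; exact h (Or.inl hm)
      · intro h; rintro (hm | he)
        · exact h hm
        · omega
    simp only [hiff]
    rw [ih (j0 + 1) dup a (by omega)]

theorem findJ_none (x : List (List Int)) (hx : Cells x) (hxn : pvNormB x = x)
    (l : List (List (List Int))) :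
    ∀ j0 dup, (∀ Y ∈ l, Cells Y) → pvFindJ x l dup j0 = none →
      cntU j0 l dup (canonC x) = 0 := by
  induction l with
  | nil => intros; rfl
  | cons Y t ih =>
    intro j0 dup hl hnone
    rw [pvFindJ] at hnone
    split at hnone
    · cases hnone
    · rename_i hcond
      rw [cntU, ih (j0 + 1) dup (fun Z hZ => hl Z (List.mem_cons_of_mem Y hZ)) hnone]
      have hno : ¬(j0 ∉ dup ∧ canonC Y = canonC x) := by
        intro ⟨h1, h2⟩
        exact hcond ⟨h1, (key_iff x Y (hl Y List.mem_cons_self) hx hxn).2 h2.symm⟩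
      simp [hno]

theorem findJ_some (x : List (List Int)) (hx : Cells x) (hxn : pvNormB x = x)
    (l : List (List (List Int))) :
    ∀ j0 dup j, (∀ Y ∈ l, Cells Y) → pvFindJ x l dup j0 = some j →
      0 < cntU j0 l dup (canonC x) ∧ j0 ≤ j ∧
      ∀ k, cntU j0 l (dup ++ [j]) k =
        if k = canonC x then cntU j0 l dup k - 1 else cntU j0 l dup k := by
  induction l with
  | nil => intro j0 dup j _ h; cases h
  | cons Y t ih =>
    intro j0 dup j hl hsome
    have hYc : Cells Y := hl Y List.mem_cons_self
    rw [pvFindJ] at hsome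
    split at hsome
    · rename_i hcond
      cases hsome
      have hkey : canonC Y = canonC x :=
        ((key_iff x Y hYc hx hxn).1 hcond.2).symm
      refine ⟨?_, le_refl _, ?_⟩
      · rw [cntU]
        have hyes : (j0 ∉ dup ∧ canonC Y = canonC x) := ⟨hcond.1, hkey⟩
        simp [hyes]
      · intro k
        have hmem : j0 ∈ dup ++ [j0] := by simp
        rw [cntU, cntU, cnt_append_lt t k (j0 + 1) dup j0 (by omega)]
        have h1 : ¬(j0 ∉ dup ++ [j0] ∧ canonC Y = k) := fun ⟨h, _⟩ => h hmem
        by_cases hk : k = canonC x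
        · have h2 : (j0 ∉ dup ∧ canonC Y = k) := ⟨hcond.1, hk ▸ hkey⟩
          rw [if_pos hk, if_neg h1, if_pos h2]
          omega
        · have h2 : ¬(j0 ∉ dup ∧ canonC Y = k) := by
            rintro ⟨_, he⟩
            exact hk (he ▸ hkey ▸ rfl)
          rw [if_neg hk, if_neg h1, if_neg h2]
    · rename_i hcond
      obtain ⟨pos2, le2, eq2⟩ := ih (j0 + 1) dup j (fun Z hZ => hl Z (List.mem_cons_of_mem Y hZ)) hsome
      have hne : j ≠ j0 := by omega
      have hmemiff : j0 ∉ dup ++ [j] ↔ j0 ∉ dup := by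
        simp only [List.mem_append, List.mem_singleton]
        constructor
        · intro h hm; exact h (Or.inl hm)
        · intro h; rintro (hm | he)
          · exact h hm
          · exact hne he.symm
      have hheadnotx : ¬(j0 ∉ dup ∧ canonC Y = canonC x) := by
        intro ⟨h1, h2⟩
        exact hcond ⟨h1, (key_iff x Y hYc hx hxn).2 h2.symm⟩
      refine ⟨?_, by omega, ?_⟩
      · rw [cntU]; omega
      · intro k
        have hhead : (if j0 ∉ dup ++ [j] ∧ canonC Y = k then (1 : Nat) else 0)
            = (if j0 ∉ dup ∧ canonC Y = k then 1 else 0) := by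
          by_cases hY2 : canonC Y = k
          · by_cases hd : j0 ∉ dup
            · rw [if_pos ⟨hmemiff.2 hd, hY2⟩, if_pos ⟨hd, hY2⟩]
            · rw [if_neg (fun hh => hd (hmemiff.1 hh.1)), if_neg (fun hh => hd hh.1)]
          · rw [if_neg (fun hh => hY2 hh.2), if_neg (fun hh => hY2 hh.2)]
        rw [cntU, cntU, eq2 k, hhead]
        by_cases hk : k = canonC x
        · have hzero : ¬(j0 ∉ dup ∧ canonC Y = k) := by
            rintro ⟨h1, h2⟩
            exact hheadnotx ⟨h1, hk ▸ h2⟩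
          rw [if_pos hk, if_pos hk, if_neg hzero]
          omega
        · rw [if_neg hk, if_neg hk]

theorem psort_fix (x : List (List Int)) (hx : Cells x) (hxn : pvNormB x = x) :
    PySem.List.sorted x (fun c => c) = x := by
  conv_lhs => rw [← hxn]
  rw [psort_self _ (normB_pairwise x hx), hxn]

theorem len_cast (p : List (List Int)) : PySem.List.len p = (p.length : Int) := by
  rw [PySem.List.len_eq]

theorem len_cast2 (p : List Int) : PySem.List.len p = (p.length : Int) := by
  rw [PySem.List.len_eq]

theorem outer_loop (n2 : List (List (List Int))) (hn2 : ∀ Y ∈ n2, Cells Y)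
    (n1 : List (List (List Int))) (hn1 : ∀ x ∈ n1, Cells x ∧ pvNormB x = x) :
    ∀ (ans : Int) (dup : List Int) (f : List (List (List Int)) → Nat),
      (∀ k, cntU 0 n2 dup k = f k) →
      (n1.foldl (fun st x =>
          match pvFindJ (PySem.List.sorted x (fun c => c)) n2 st.2 0 with
          | some j => (st.1 + PySem.List.len x, st.2 ++ [j])
          | none => st) (ans, dup)).1 = ans + runSpec (n1.map canonC) f := by
  induction n1 with
  | nil => intro ans dup f _; simp [runSpec]
  | cons x n1s ih =>
    intro ans dup f hf
    obtain ⟨hxc, hxn⟩ := hn1 x List.mem_cons_self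
    have hn1t : ∀ y ∈ n1s, Cells y ∧ pvNormB y = y :=
      fun y hy => hn1 y (List.mem_cons_of_mem x hy)
    simp only [List.foldl_cons, psort_fix x hxc hxn]
    cases hfind : pvFindJ x n2 dup 0 with
    | none =>
      have h0 : cntU 0 n2 dup (canonC x) = 0 := findJ_none x hxc hxn n2 0 dup hn2 hfind
      have hfx : ¬ 0 < f (canonC x) := by rw [← hf]; omega
      simp only [List.map_cons, runSpec, if_neg hfx]
      exact ih hn1t ans dup f hf
    | some j =>
      obtain ⟨hpos, _, heq⟩ := findJ_some x hxc hxn n2 0 dup j hn2 hfind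
      have hfx : 0 < f (canonC x) := by rw [← hf]; omega
      have hf2 : ∀ k, cntU 0 n2 (dup ++ [j]) k =
          Function.update f (canonC x) (f (canonC x) - 1) k := by
        intro k
        rw [heq k, Function.update_apply]
        by_cases hk : k = canonC x
        · rw [if_pos hk, if_pos hk, hf, hk]
        · rw [if_neg hk, if_neg hk, hf]
      simp only [List.map_cons, runSpec, if_pos hfx]
      rw [ih hn1t (ans + PySem.List.len x) (dup ++ [j]) _ hf2, wK_canon x, len_cast]
      ring

theorem alt_loop (cri : Int) (test1 : List (List Int)) :
    ∀ (ans : Int) (d : PySem.Dict (List (List (List Int))) Int)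
      (f : List (List (List Int)) → Nat), (∀ k, d.getD k 0 = (f k : Int)) →
      (test1.foldl (fun (st : Int × PySem.Dict (List (List (List Int))) Int) p =>
          let k := pvCanon cri p
          if 0 < st.2.getD k 0 then (st.1 + PySem.List.len p, st.2.insert k (st.2.getD k 0 - 1)) else st)
        (ans, d)).1 = ans + runSpec (test1.map (pvCanon cri)) f := by
  induction test1 with
  | nil => intro ans d f _; simp [runSpec]
  | cons p t ih =>
    intro ans d f hd
    simp only [List.foldl_cons, List.map_cons, runSpec]
    have hcond : (0 < d.getD (pvCanon cri p) 0) ↔ (0 < f (pvCanon cri p)) := by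
      rw [hd]; exact Int.natCast_pos
    by_cases hp : 0 < f (pvCanon cri p)
    · have hc : 0 < d.getD (pvCanon cri p) 0 := hcond.2 hp
      rw [if_pos hc, if_pos hp]
      have hd2 : ∀ k, (d.insert (pvCanon cri p) (d.getD (pvCanon cri p) 0 - 1)).getD k 0 =
          ((Function.update f (pvCanon cri p) (f (pvCanon cri p) - 1)) k : Int) := by
        intro k
        rw [PySem.Dict.getD_insert, Function.update_apply]
        by_cases hk : k = pvCanon cri p
        · rw [if_pos hk, if_pos hk, hd]
          omega
        · rw [if_neg hk, if_neg hk, hd]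
      rw [ih (ans + PySem.List.len p) _ _ hd2, wK_pvCanon cri p, len_cast2]
      ring
    · have hc : ¬ 0 < d.getD (pvCanon cri p) 0 := fun h => hp (hcond.1 h)
      rw [if_neg hc, if_neg hp]
      exact ih ans d f hd

-- ===== VERDICT (by name: the statement is the Claim_ definition above) =====
theorem cells_piece (cri : Int) (p : List Int) : Cells (p.map (pvCell cri)) := by
  intro c hc
  simp only [List.mem_map] at hc
  obtain ⟨j, _, rfl⟩ := hc
  exact ⟨_, _, rfl⟩

theorem map_canon_eq (cri : Int) (t : List (List Int)) :
    (t.map (fun p => p.map (pvCell cri))).map canonC = t.map (pvCanon cri) := by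
  rw [List.map_map]
  apply List.map_congr_left
  intro p _
  exact (canon_eq cri p).symm

theorem rot_trans_spec : Claim_equal_rot_trans := by
  intro test1 test2 cri _ _
  unfold Spec_rot_trans
  have hmapnorm : (fun p => pvTranslate (PySem.List.sorted p (fun c => c))) = pvNormB :=
    funext fun p => (normB_eq_translate p).symm
  set L1 := test1.map (fun p => p.map (pvCell cri)) with hL1
  set L2 := test2.map (fun p => p.map (pvCell cri)) with hL2
  set f0 : List (List (List Int)) → Nat := fun k => (test2.map (pvCanon cri)).count k with hf0
  have hcellsL1 : ∀ Z ∈ L1, Cells Z := by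
    intro Z hZ
    rw [hL1] at hZ
    simp only [List.mem_map] at hZ
    obtain ⟨p, _, rfl⟩ := hZ
    exact cells_piece cri p
  have hcellsL2 : ∀ Z ∈ L2, Cells Z := by
    intro Z hZ
    rw [hL2] at hZ
    simp only [List.mem_map] at hZ
    obtain ⟨p, _, rfl⟩ := hZ
    exact cells_piece cri p
  -- the A side
  have hA : rot_trans test1 test2 cri =
      0 + runSpec (((PySem.List.sorted L1 (fun x => x)).map pvNormB).map canonC) f0 := by
    unfold rot_trans
    simp only [← hL1, ← hL2, hmapnorm]
    apply outer_loop
    · intro Y hY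
      exact hcellsL2 Y ((PySem.List.mem_sorted L2 _ false Y).1 hY)
    · intro x hx
      simp only [List.mem_map] at hx
      obtain ⟨Z, hZ, rfl⟩ := hx
      have hZc : Cells Z := hcellsL1 Z ((PySem.List.mem_sorted L1 _ false Z).1 hZ)
      exact ⟨normB_cells Z, normB_idem Z hZc⟩
    · intro k
      rw [cnt_nil_dup]
      rw [((PySem.List.sorted_perm L2 (fun x => x) false).map canonC).count_eq k]
      rw [hL2, map_canon_eq]
  -- the B side
  have hB : rot_trans_alt test1 test2 cri =
      0 + runSpec (test1.map (pvCanon cri)) f0 := by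
    unfold rot_trans_alt
    apply alt_loop
    intro k
    have hfold : test2.foldl
        (fun (d : PySem.Dict (List (List (List Int))) Int) p =>
          d.insert (pvCanon cri p) (d.getD (pvCanon cri p) 0 + 1)) PySem.Dict.empty =
        (test2.map (pvCanon cri)).foldl
          (fun (d : PySem.Dict (List (List (List Int))) Int) x =>
            d.insert x (d.getD x 0 + 1)) PySem.Dict.empty :=
      (List.foldl_map (f := pvCanon cri) (g := fun (d : PySem.Dict (List (List (List Int))) Int) x => d.insert x (d.getD x 0 + 1)) (l := test2) (init := PySem.Dict.empty)).symm
    rw [hfold, PySem.Dict.getD_foldl_insert_add_one]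
    simp [hf0]
  rw [hA, hB]
  congr 1
  apply runSpec_perm
  have hmc : ((PySem.List.sorted L1 (fun x => x)).map pvNormB).map canonC =
      (PySem.List.sorted L1 (fun x => x)).map canonC := by
    rw [List.map_map]
    apply List.map_congr_left
    intro Z hZ
    exact canon_norm Z (hcellsL1 Z ((PySem.List.mem_sorted L1 _ false Z).1 hZ))
  rw [hmc, ← map_canon_eq cri test1, ← hL1]
  exact (PySem.List.sorted_perm L1 (fun x => x) false).map canonC
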